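-- pv_equiv track=rewrite | github.com/8804who/python_practice | 프로그래머스/프로그래머스 인사고과.py | solution
-- ===== SOURCE A (Python) =====
-- def solution(scores):
--     answer = 0
--     length = len(scores)
--     fail = [False for _ in range(length)]
--
--     for i in range(length):
--         scores[i].append(i)
--     scores.sort(key=lambda x: (x[0], x[1]))
--
--     nowAttitude = scores[-1][0]
--     prevMax = -1
--     maxPeer = scores[-1][1]
--
--     for i in range(length - 1, -1, -1):
--         if nowAttitude != scores[i][0]:
--             if prevMax < maxPeer:
--                 prevMax = maxPeer
--             nowAttitude = scores[i][0]
--             maxPeer = scores[i][1]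
--         if prevMax > scores[i][1]:
--             fail[scores[i][2]] = True
--
--     scores.sort(key=lambda x: (x[0] + x[1], -x[2]), reverse=True)
--
--     if fail[0]:
--         return -1
--
--     for i in scores:
--         if i[2] == 0:
--             answer += 1
--             break
--         else:
--             if fail[i[2]]:
--                 continue
--             else:
--                 answer += 1
--     return answer
-- ===== SOURCE B (Python) =====
-- def solution(scores):
--     n = len(scores)
--     # best attitude among people with strictly higher grade, floored at -1 (A's sentinel)
--     fail = [max([-1] + [t[1] for t in scores if t[0] > s[0]]) > s[1] for s in scores]
--     for i in range(n):
--         scores[i].append(i)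
--     scores.sort(key=lambda x: (x[0] + x[1], -x[2]), reverse=True)
--     if fail[0]:
--         return -1
--     answer = 0
--     for row in scores:
--         if row[2] == 0:
--             answer += 1
--             break
--         if not fail[row[2]]:
--             answer += 1
--     return answer
-- ===== Notes on version B (the rewrite author's own statement) =====
-- stated objective: simpler
-- what changed: The sort-then-backward-scan domination phase with its nowAttitude/prevMax/maxPeer bookkeeping is replaced by a direct per-row computation of the best attitude among strictly higher grades (floored at -1 as in A); the index-appending mutation, final sort and rank loop are kept.
-- outside the precondition, e.g. on solution([]): A raises IndexError, B raises IndexError; on solution([[5]]): A raises IndexError, B raises IndexError; on solution([[3, 4, 0], [1, 2, 0]]): A returns -1, B returns 1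
import Mathlib
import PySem

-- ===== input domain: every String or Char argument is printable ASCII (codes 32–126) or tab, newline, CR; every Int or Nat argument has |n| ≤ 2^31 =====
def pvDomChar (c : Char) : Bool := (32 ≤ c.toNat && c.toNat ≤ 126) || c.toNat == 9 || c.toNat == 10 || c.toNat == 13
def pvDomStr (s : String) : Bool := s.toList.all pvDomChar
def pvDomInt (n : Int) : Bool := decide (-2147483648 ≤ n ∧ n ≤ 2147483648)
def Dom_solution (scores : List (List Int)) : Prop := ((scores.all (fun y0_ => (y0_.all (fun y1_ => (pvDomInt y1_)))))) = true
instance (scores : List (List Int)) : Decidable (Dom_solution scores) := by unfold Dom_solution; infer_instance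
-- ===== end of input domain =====

-- B replaces A's first-sort-plus-backward-scan domination phase by a direct per-row maximum
-- (same return value; both Pythons mutate `scores` identically — index appending and the final
-- in-place sort — and the equivalence proved here is about the return value).

-- ===== PORT A =====
-- `for i in range(length): scores[i].append(i)`  (identical line in A and B)
def pvAppendIdx (scores : List (List Int)) : List (List Int) :=
  (PySem.List.pyRange 0 (scores.length : Int)).foldl
    (fun sc i => PySem.List.pySetD sc i (PySem.List.pyGetD sc i [] ++ [i])) scores

-- `scores.sort(key=lambda x: (x[0] + x[1], -x[2]), reverse=True)`  (identical line in A and B)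
def pvFinalSort (l : List (List Int)) : List (List Int) :=
  PySem.List.sorted2 l (fun x => PySem.List.pyGetD x 0 0 + PySem.List.pyGetD x 1 0)
    (fun x => -(PySem.List.pyGetD x 2 0)) true

-- `fail = [False for _ in range(length)]`
def pvFail0 (scores : List (List Int)) : List Bool :=
  (PySem.List.pyRange 0 (scores.length : Int)).map (fun _ => false)

-- `scores.sort(key=lambda x: (x[0], x[1]))`
def pvSortAB (l : List (List Int)) : List (List Int) :=
  PySem.List.sorted2 l (fun x => PySem.List.pyGetD x 0 0) (fun x => PySem.List.pyGetD x 1 0)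

-- the body of A's backward scan; state = (nowAttitude, prevMax, maxPeer, fail)
def pvBoundaryA (st : Int × Int × Int × List Bool) (row : List Int) :
    Int × Int × Int × List Bool :=
  if st.1 ≠ PySem.List.pyGetD row 0 0 then
    (PySem.List.pyGetD row 0 0,
     if st.2.1 < st.2.2.1 then st.2.2.1 else st.2.1,
     PySem.List.pyGetD row 1 0, st.2.2.2)
  else st

def pvStepA (st : Int × Int × Int × List Bool) (row : List Int) : Int × Int × Int × List Bool :=
  if (pvBoundaryA st row).2.1 > PySem.List.pyGetD row 1 0 then
    ((pvBoundaryA st row).1, (pvBoundaryA st row).2.1, (pvBoundaryA st row).2.2.1,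
     PySem.List.pySetD (pvBoundaryA st row).2.2.2 (PySem.List.pyGetD row 2 0) true)
  else pvBoundaryA st row

-- `for i in range(length - 1, -1, -1): ...` starting from scores[-1]
def pvScanA (length : Int) (scores2 : List (List Int)) (fail : List Bool) : List Bool :=
  ((PySem.List.pyRange (length - 1) (-1) (-1)).foldl
    (fun st i => pvStepA st (PySem.List.pyGetD scores2 i []))
    (PySem.List.pyGetD (PySem.List.pyGetD scores2 (-1) []) 0 0, -1,
     PySem.List.pyGetD (PySem.List.pyGetD scores2 (-1) []) 1 0, fail)).2.2.2

-- A's final counting loop with `break`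
def pvCountA (fail : List Bool) : List (List Int) → Int → Int
  | [], answer => answer
  | r :: rest, answer =>
    if PySem.List.pyGetD r 2 0 = 0 then answer + 1
    else if PySem.List.pyGetD fail (PySem.List.pyGetD r 2 0) false then pvCountA fail rest answer
    else pvCountA fail rest (answer + 1)

def solution (scores : List (List Int)) : Int :=
  let scores2 := pvSortAB (pvAppendIdx scores)
  let fail2 := pvScanA (scores.length : Int) scores2 (pvFail0 scores)
  let scores3 := pvFinalSort scores2
  if PySem.List.pyGetD fail2 0 false then -1
  else pvCountA fail2 scores3 0

-- ===== PORT B =====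
-- `fail = [max([-1] + [t[1] for t in scores if t[0] > s[0]]) > s[1] for s in scores]`
def pvFailB (scores : List (List Int)) : List Bool :=
  scores.map (fun s =>
    decide ((PySem.List.max?
        (-1 :: (scores.filter (fun t => decide (PySem.List.pyGetD t 0 0 > PySem.List.pyGetD s 0 0))).map
          (fun t => PySem.List.pyGetD t 1 0)) (fun y => y)).getD (-1)
      > PySem.List.pyGetD s 1 0))

-- B's final counting loop with `break`
def pvCountB (fail : List Bool) : List (List Int) → Int → Int
  | [], answer => answer
  | r :: rest, answer =>
    if PySem.List.pyGetD r 2 0 = 0 then answer + 1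
    else pvCountB fail rest
      (if PySem.List.pyGetD fail (PySem.List.pyGetD r 2 0) false then answer else answer + 1)

def solution_alt (scores : List (List Int)) : Int :=
  let fail := pvFailB scores
  let scores2 := pvFinalSort (pvAppendIdx scores)
  if PySem.List.pyGetD fail 0 false then -1
  else pvCountB fail scores2 0

-- ===== PRECONDITION & SPEC =====
-- Pre_ excludes the empty list (A raises IndexError on scores[-1]) and inner rows whose length
-- is not 2: shorter rows make A raise, and on longer rows A indexes `fail` by a data value
-- instead of the appended index, raising or returning an accidental value.
def Pre_solution (scores : List (List Int)) : Prop :=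
  scores ≠ [] ∧ ∀ s ∈ scores, s.length = 2
instance (scores : List (List Int)) : Decidable (Pre_solution scores) := by
  unfold Pre_solution; infer_instance

def pvWitness_solution : List (List Int) := [[1, 2], [3, 4]]

def Spec_solution (scores : List (List Int)) (out : Int) : Prop := out = solution_alt scores
instance (scores : List (List Int)) (out : Int) : Decidable (Spec_solution scores out) := by
  unfold Spec_solution; infer_instance

-- ===== CLAIM (what is proved, stated in full; the proofs are below) =====
def Claim_equal_solution : Prop :=
  ∀ (scores : List (List Int)), Dom_solution scores → Pre_solution scores →
    Spec_solution scores (solution scores)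

-- ===== LEMMAS AND PROOFS =====

-- row accessors
def pvAx (r : List Int) : Int := PySem.List.pyGetD r 0 0
def pvBx (r : List Int) : Int := PySem.List.pyGetD r 1 0
def pvIx (r : List Int) : Int := PySem.List.pyGetD r 2 0

-- lexicographic keys of the two Python sorts
def pvKey1 (r : List Int) : Int ×ₗ Int := toLex (pvAx r, pvBx r)
def pvKey2 (r : List Int) : Int ×ₗ Int := toLex (pvAx r + pvBx r, -(pvIx r))

-- max of a list of ints floored at -1
def pvM (l : List Int) : Int := l.foldl max (-1)

-- floored max of the attitudes of rows with grade strictly above c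
def pvBig (R : List (List Int)) (c : Int) : Int :=
  pvM ((R.filter (fun y => decide (c < pvAx y))).map pvBx)

-- descending lexicographic relation on rows (the order of A's reversed scan)
def pvRel (a b : List Int) : Prop :=
  pvAx b < pvAx a ∨ (pvAx b = pvAx a ∧ pvBx b ≤ pvBx a)

-- the rows-with-index list, proof-side normal form of pvAppendIdx
def pvAppIdx (l : List (List Int)) : List (List Int) :=
  (PySem.List.enumerate l 0).map (fun p => p.2 ++ [p.1])

-- invariant of A's backward scan after processing the prefix P of the reversed sorted list R
def pvInv (R : List (List Int)) (nN : Nat) (P : List (List Int))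
    (st : Int × Int × Int × List Bool) : Prop :=
  ∃ hP : P ≠ [],
    st.1 = pvAx (P.getLast hP)
    ∧ st.2.1 = pvBig P (pvAx (P.getLast hP))
    ∧ (∃ q ∈ P, pvAx q = pvAx (P.getLast hP) ∧ st.2.2.1 = pvBx q)
    ∧ (∀ y ∈ P, pvAx y = pvAx (P.getLast hP) → pvBx y ≤ st.2.2.1)
    ∧ (∀ y ∈ P, pvAx (P.getLast hP) ≤ pvAx y)
    ∧ st.2.2.2.length = nN
    ∧ (∀ j : Nat, j < nN → (∀ x ∈ P, pvIx x ≠ (j : Int)) → st.2.2.2.getD j false = false)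
    ∧ (∀ x ∈ P, st.2.2.2.getD (pvIx x).toNat false = decide (pvBig R (pvAx x) > pvBx x))

-- ---- generic max lemmas ----

theorem neg_one_le_pvM (l : List Int) : -1 ≤ pvM l := (PySem.List.le_foldl_max l (-1)).1

theorem le_pvM (l : List Int) (v : Int) (h : v ∈ l) : v ≤ pvM l :=
  (PySem.List.le_foldl_max l (-1)).2 v h

theorem pvM_le (l : List Int) (c : Int) (h0 : -1 ≤ c) (h : ∀ v ∈ l, v ≤ c) : pvM l ≤ c := by
  rcases PySem.List.foldl_max_mem l (-1) with hm | hm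
  · rw [pvM, hm]; omega
  · exact h _ hm

theorem pvM_perm {l₁ l₂ : List Int} (h : l₁.Perm l₂) : pvM l₁ = pvM l₂ :=
  h.foldl_eq (rcomm := ⟨fun b a₁ a₂ => max_right_comm b a₁ a₂⟩) (-1)

-- ---- sorted2 as a lex sort ----

theorem pvInsertBy_congr {α : Type} (b1 b2 : α → α → Bool) (h : ∀ a b, b1 a b = b2 a b)
    (x : α) : ∀ ys, PySem.List.insertBy b1 x ys = PySem.List.insertBy b2 x ys := by
  intro ys
  induction ys with
  | nil => rfl
  | cons y ys ih => simp only [PySem.List.insertBy, h, ih]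

theorem pvFoldl_insertBy_congr {α : Type} (b1 b2 : α → α → Bool) (h : ∀ a b, b1 a b = b2 a b) :
    ∀ (l acc : List α),
      l.foldl (fun acc x => PySem.List.insertBy b1 x acc) acc
        = l.foldl (fun acc x => PySem.List.insertBy b2 x acc) acc := by
  intro l acc
  simp only [pvInsertBy_congr b1 b2 h]

theorem pvLexBool (a1 a2 b1 b2 : Int) :
    (decide (a1 < b1) || (!decide (b1 < a1) && decide (a2 < b2)))
      = decide (toLex (a1, a2) < toLex (b1, b2)) := by
  by_cases h1 : a1 < b1 <;> by_cases h2 : b1 < a1 <;> by_cases h3 : a2 < b2 <;>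
    by_cases h4 : a1 = b1 <;>
    simp [Prod.Lex.toLex_lt_toLex, h1, h2, h3, h4] <;> omega

theorem pvSortAB_eq (l : List (List Int)) : pvSortAB l = PySem.List.sorted l pvKey1 := by
  refine pvFoldl_insertBy_congr _ _ (fun a b => ?_) l []
  exact pvLexBool (pvAx a) (pvBx a) (pvAx b) (pvBx b)

theorem pvFinalSort_eq (l : List (List Int)) :
    pvFinalSort l = PySem.List.sorted l pvKey2 true := by
  refine pvFoldl_insertBy_congr _ _ (fun a b => ?_) l []
  exact pvLexBool (pvAx b + pvBx b) (-(pvIx b)) (pvAx a + pvBx a) (-(pvIx a))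

-- ---- the append loop ----

theorem pvAppIdx_concat (X : List (List Int)) (y : List Int) :
    pvAppIdx (X ++ [y]) = pvAppIdx X ++ [y ++ [(X.length : Int)]] := by
  unfold pvAppIdx
  rw [PySem.List.enumerate_append, List.map_append]
  simp [PySem.List.enumerate]

theorem pvApp_aux (sc : List (List Int)) :
    ∀ (m k : Nat), k + m = sc.length →
      (PySem.List.pyRange (k : Int) (sc.length : Int)).foldl
        (fun l i => PySem.List.pySetD l i (PySem.List.pyGetD l i [] ++ [i]))
        (pvAppIdx (sc.take k) ++ sc.drop k) = pvAppIdx sc := by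
  intro m
  induction m with
  | zero =>
    intro k hk
    have hk' : k = sc.length := by omega
    subst hk'
    rw [PySem.List.pyRange_one_eq_nil (le_refl _)]
    simp [pvAppIdx]
  | succ m ih =>
    intro k hk
    have hklt : k < sc.length := by omega
    have hAlen : (pvAppIdx (sc.take k)).length = k := by
      simp [pvAppIdx, PySem.List.length_enumerate, List.length_take]
      omega
    rw [PySem.List.pyRange_one_cons (by exact_mod_cast hklt)]
    simp only [List.foldl_cons]
    have hget : PySem.List.pyGetD (pvAppIdx (sc.take k) ++ sc.drop k) (k : Int) []
        = sc[k] := by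
      rw [PySem.List.pyGetD_natCast, List.getD_eq_getElem?_getD,
        List.getElem?_append_right (by omega), hAlen]
      rw [List.drop_eq_getElem_cons hklt]
      simp [List.getElem?_eq_getElem hklt]
    have hset : PySem.List.pySetD (pvAppIdx (sc.take k) ++ sc.drop k) (k : Int)
        (sc[k] ++ [(k : Int)])
        = pvAppIdx (sc.take (k + 1)) ++ sc.drop (k + 1) := by
      rw [PySem.List.pySetD_natCast, List.set_append_right _ _ (by omega), hAlen]
      rw [List.drop_eq_getElem_cons hklt]
      simp only [Nat.sub_self, List.set_cons_zero]
      rw [List.take_add_one, List.getElem?_eq_getElem hklt]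
      simp only [Option.toList_some]
      rw [pvAppIdx_concat]
      have hlt : (List.take k sc).length = k := by
        simp [List.length_take]
        omega
      rw [hlt, List.append_assoc]
      rfl
    rw [hget, hset]
    have hcast : (k : Int) + 1 = ((k + 1 : Nat) : Int) := by push_cast; ring
    rw [hcast]
    exact ih (k + 1) (by omega)

theorem pvAppendIdx_eq (scores : List (List Int)) : pvAppendIdx scores = pvAppIdx scores := by
  have := pvApp_aux scores scores.length 0 (by omega)
  simpa [pvAppendIdx, pvAppIdx] using this

theorem pvAppIdx_getElem? (sc : List (List Int)) (j : Nat) :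
    (pvAppIdx sc)[j]? = sc[j]?.map (fun s => s ++ [(j : Int)]) := by
  unfold pvAppIdx
  rw [List.getElem?_map, PySem.List.getElem?_enumerate]
  cases sc[j]? <;> simp

theorem pvAppIdx_length (sc : List (List Int)) : (pvAppIdx sc).length = sc.length := by
  simp [pvAppIdx, PySem.List.length_enumerate]

-- ---- pvBig lemmas ----

theorem pvBig_concat_notgt (P : List (List Int)) (x : List Int) (c : Int)
    (h : ¬ c < pvAx x) : pvBig (P ++ [x]) c = pvBig P c := by
  unfold pvBig
  rw [List.filter_append]
  simp [h]

theorem pvBig_suffix (R P rest : List (List Int)) (x : List Int)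
    (hsplit : R = P ++ x :: rest) (hxrest : ∀ z ∈ rest, ¬ pvAx x < pvAx z) :
    pvBig R (pvAx x) = pvBig P (pvAx x) := by
  unfold pvBig
  rw [hsplit, List.filter_append]
  have h1 : (x :: rest).filter (fun y => decide (pvAx x < pvAx y)) = [] := by
    rw [List.filter_eq_nil_iff]
    intro z hz
    simp only [decide_eq_true_eq]
    rcases List.mem_cons.mp hz with h | h
    · subst h; exact lt_irrefl _
    · exact hxrest z h
  rw [h1, List.append_nil]

-- ---- getD/set lemmas ----

theorem pvGetD_set_self (l : List Bool) (i : Nat) (h : i < l.length) :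
    (l.set i true).getD i false = true := by
  simp [List.getD_eq_getElem?_getD, h]

theorem pvGetD_set_ne (l : List Bool) (i j : Nat) (v : Bool) (h : i ≠ j) :
    (l.set i v).getD j false = l.getD j false := by
  simp [List.getD_eq_getElem?_getD, h]

theorem pvStepA_eq (st : Int × Int × Int × List Bool) (x : List Int)
    (ax' prev' peer' : Int) (fl : List Bool)
    (hb : pvBoundaryA st x = (ax', prev', peer', fl)) :
    pvStepA st x
      = (ax', prev', peer',
         if prev' > pvBx x then PySem.List.pySetD fl (pvIx x) true else fl) := by
  show pvStepA st x
      = (ax', prev', peer',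
         if prev' > PySem.List.pyGetD x 1 0 then
           PySem.List.pySetD fl (PySem.List.pyGetD x 2 0) true
         else fl)
  unfold pvStepA
  rw [hb]
  split <;> rfl

-- ---- the invariant core step ----

theorem pvInv_core (R : List (List Int)) (nN : Nat)
    (hpw : R.Pairwise pvRel) (hix : ∀ r ∈ R, 0 ≤ pvIx r ∧ pvIx r < (nN : Int))
    (hnd : (R.map pvIx).Nodup)
    (P : List (List Int)) (x : List Int) (rest : List (List Int)) (hsplit : R = P ++ x :: rest)
    (prev peer : Int) (fl : List Bool)
    (hprev : prev = pvBig (P ++ [x]) (pvAx x))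
    (hpeerx : ∃ q ∈ P ++ [x], pvAx q = pvAx x ∧ peer = pvBx q)
    (hpeerUB : ∀ y ∈ P ++ [x], pvAx y = pvAx x → pvBx y ≤ peer)
    (hlow : ∀ y ∈ P, pvAx x ≤ pvAx y)
    (hflen : fl.length = nN)
    (hU : ∀ j : Nat, j < nN → (∀ y ∈ P, pvIx y ≠ (j : Int)) → fl.getD j false = false)
    (hS : ∀ y ∈ P, fl.getD (pvIx y).toNat false = decide (pvBig R (pvAx y) > pvBx y)) :
    pvInv R nN (P ++ [x])
      (pvAx x, prev, peer, if prev > pvBx x then PySem.List.pySetD fl (pvIx x) true else fl) := by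
  have hxR : x ∈ R := by rw [hsplit]; exact List.mem_append_right _ (List.mem_cons_self)
  have hixx := hix x hxR
  have hxrest : ∀ z ∈ rest, pvRel x z := by
    rw [hsplit, List.pairwise_append] at hpw
    exact (List.pairwise_cons.mp hpw.2.1).1
  have hxrest' : ∀ z ∈ rest, ¬ pvAx x < pvAx z := by
    intro z hz
    rcases hxrest z hz with h | ⟨h1, _⟩ <;> omega
  have hPneq : ∀ y ∈ P, pvIx y ≠ pvIx x := by
    rw [hsplit, List.map_append, List.nodup_append] at hnd
    intro y hy
    exact hnd.2.2 (pvIx y) (List.mem_map_of_mem hy) (pvIx x)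
      (List.mem_map_of_mem List.mem_cons_self)
  have hBR : pvBig R (pvAx x) = prev := by
    rw [hprev, pvBig_concat_notgt P x _ (lt_irrefl _)]
    exact pvBig_suffix R P rest x hsplit hxrest'
  have hlast : ∀ (h : P ++ [x] ≠ []), (P ++ [x]).getLast h = x := fun _ => List.getLast_concat
  have hPne : P ++ [x] ≠ [] := by simp
  refine ⟨hPne, ?_, ?_, ?_, ?_, ?_, ?_, ?_, ?_⟩
  · rw [hlast]
  · rw [hlast]; exact hprev
  · rw [hlast]; exact hpeerx
  · rw [hlast]; exact hpeerUB
  · rw [hlast]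
    intro y hy
    rcases List.mem_append.mp hy with h | h
    · exact hlow y h
    · rw [List.mem_singleton.mp h]
  · split
    · rw [PySem.List.pySetD_of_nonneg fl true hixx.1]
      simp [hflen]
    · exact hflen
  · intro j hj hnone
    have hnx : pvIx x ≠ (j : Int) := hnone x (List.mem_append_right _ (List.mem_cons_self))
    have hold : ∀ y ∈ P, pvIx y ≠ (j : Int) := fun y hy =>
      hnone y (List.mem_append_left _ hy)
    split
    · rw [PySem.List.pySetD_of_nonneg fl true hixx.1]
      rw [pvGetD_set_ne fl _ j true (by omega)]
      exact hU j hj hold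
    · exact hU j hj hold
  · intro y hy
    rcases List.mem_append.mp hy with hyP | hyx
    · have hyR : y ∈ R := by rw [hsplit]; exact List.mem_append_left _ hyP
      have hiy := hix y hyR
      have hne : (pvIx x).toNat ≠ (pvIx y).toNat := by
        have := hPneq y hyP; omega
      split
      · rw [PySem.List.pySetD_of_nonneg fl true hixx.1,
          pvGetD_set_ne fl _ _ true hne]
        exact hS y hyP
      · exact hS y hyP
    · rw [List.mem_singleton.mp hyx]
      rw [hBR]
      split
      · rename_i hc
        rw [PySem.List.pySetD_of_nonneg fl true hixx.1,
          pvGetD_set_self fl _ (by omega)]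
        simp only [gt_iff_lt] at hc ⊢
        simp [hc]
      · rename_i hc
        have h0 : fl.getD (pvIx x).toNat false = false := by
          apply hU (pvIx x).toNat (by omega)
          intro y hyP
          have := hPneq y hyP
          omega
        rw [h0]
        simp only [gt_iff_lt] at hc ⊢
        simp [hc]

-- ---- the step preservation ----

theorem pvStep_preserves (R : List (List Int)) (nN : Nat)
    (hpw : R.Pairwise pvRel) (hix : ∀ r ∈ R, 0 ≤ pvIx r ∧ pvIx r < (nN : Int))
    (hnd : (R.map pvIx).Nodup)
    (P : List (List Int)) (x : List Int) (rest : List (List Int))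
    (hsplit : R = P ++ x :: rest) (st : Int × Int × Int × List Bool)
    (hInv : pvInv R nN P st) : pvInv R nN (P ++ [x]) (pvStepA st x) := by
  obtain ⟨hP, hnow, hprev, ⟨q, hqP, hqax, hpeerq⟩, hpeerUB, hlow, hflen, hU, hS⟩ := hInv
  have hplast : P.getLast hP ∈ P := List.getLast_mem hP
  have hPx : ∀ y ∈ P, pvRel y x := by
    rw [hsplit, List.pairwise_append] at hpw
    exact fun y hy => hpw.2.2 y hy x (List.mem_cons_self)
  have hpx := hPx _ hplast
  by_cases hceq : st.1 = pvAx x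
  · -- no group boundary
    have hax : pvAx (P.getLast hP) = pvAx x := by rw [← hnow, hceq]
    have hb : pvBoundaryA st x = (pvAx x, st.2.1, st.2.2.1, st.2.2.2) := by
      unfold pvBoundaryA
      rw [if_neg (show ¬(st.1 ≠ PySem.List.pyGetD x 0 0) from not_not_intro hceq), ← hceq]
    rw [pvStepA_eq st x _ _ _ _ hb]
    apply pvInv_core R nN hpw hix hnd P x rest hsplit _ _ _ ?_ ?_ ?_ ?_ hflen hU hS
    · rw [pvBig_concat_notgt P x _ (lt_irrefl _), hprev, hax]
    · exact ⟨q, List.mem_append_left _ hqP, by rw [hqax, hax], hpeerq⟩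
    · intro y hy hyax
      rcases List.mem_append.mp hy with h | h
      · exact hpeerUB y h (by rw [hyax, ← hax])
      · rw [List.mem_singleton.mp h]
        rcases hpx with h' | ⟨h1, h2⟩
        · omega
        · rw [hpeerq]
          calc pvBx x ≤ pvBx (P.getLast hP) := h2
            _ ≤ pvBx q := by
                have := hpeerUB q hqP hqax
                have h3 := hpeerUB (P.getLast hP) hplast rfl
                omega
          -- note: pvBx (P.getLast hP) ≤ st.2.2.1 = pvBx q
    · intro y hy
      rw [← hax]
      exact hlow y hy
  · -- group boundary
    have haxlt : pvAx x < pvAx (P.getLast hP) := by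
      rcases hpx with h | ⟨h1, _⟩
      · exact h
      · exfalso; apply hceq; rw [hnow, h1]
    have hfilter : P.filter (fun y => decide (pvAx x < pvAx y)) = P := by
      rw [List.filter_eq_self]
      intro y hy
      simp only [decide_eq_true_eq]
      exact lt_of_lt_of_le haxlt (hlow y hy)
    have hprev' : pvBig P (pvAx x) = pvM (P.map pvBx) := by
      unfold pvBig
      rw [hfilter]
    have hpm : (if st.2.1 < st.2.2.1 then st.2.2.1 else st.2.1) = pvM (P.map pvBx) := by
      have hprevle : st.2.1 ≤ pvM (P.map pvBx) := by
        rw [hprev]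
        apply pvM_le _ _ (neg_one_le_pvM _)
        intro v hv
        rcases List.mem_map.mp hv with ⟨y, hy, rfl⟩
        exact le_pvM _ _ (List.mem_map_of_mem (List.mem_of_mem_filter hy))
      have hpeerle : st.2.2.1 ≤ pvM (P.map pvBx) := by
        rw [hpeerq]
        exact le_pvM _ _ (List.mem_map_of_mem hqP)
      have hge : pvM (P.map pvBx) ≤ max st.2.1 st.2.2.1 := by
        apply pvM_le
        · have := neg_one_le_pvM ((P.filter (fun y => decide (pvAx (P.getLast hP) < pvAx y))).map pvBx)
          rw [hprev] at *
          unfold pvBig at *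
          omega
        · intro v hv
          rcases List.mem_map.mp hv with ⟨y, hy, rfl⟩
          by_cases hyax : pvAx y = pvAx (P.getLast hP)
          · have := hpeerUB y hy hyax
            omega
          · have hgt : pvAx (P.getLast hP) < pvAx y :=
              lt_of_le_of_ne (hlow y hy) (fun h => hyax h.symm)
            have hmem : pvBx y ∈ (P.filter (fun y => decide (pvAx (P.getLast hP) < pvAx y))).map pvBx :=
              List.mem_map_of_mem (List.mem_filter.mpr ⟨hy, decide_eq_true hgt⟩)
            have := le_pvM _ _ hmem
            rw [hprev] at *
            unfold pvBig at *
            omega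
      by_cases h : st.2.1 < st.2.2.1
      · rw [if_pos h]; omega
      · rw [if_neg h]; omega
    have hb : pvBoundaryA st x = (pvAx x, pvM (P.map pvBx), pvBx x, st.2.2.2) := by
      unfold pvBoundaryA
      rw [if_pos (show st.1 ≠ PySem.List.pyGetD x 0 0 from hceq), hpm]
      rfl
    rw [pvStepA_eq st x _ _ _ _ hb]
    apply pvInv_core R nN hpw hix hnd P x rest hsplit _ _ _ ?_ ?_ ?_ ?_ hflen hU hS
    · rw [pvBig_concat_notgt P x _ (lt_irrefl _), hprev']
    · exact ⟨x, List.mem_append_right _ (List.mem_singleton_self x), rfl, rfl⟩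
    · intro y hy hyax
      rcases List.mem_append.mp hy with h | h
      · exfalso
        have := hlow y h
        omega
      · rw [List.mem_singleton.mp h]
    · intro y hy
      have := hlow y hy
      omega


theorem pvScan_fold (R : List (List Int)) (nN : Nat)
    (hpw : R.Pairwise pvRel) (hix : ∀ r ∈ R, 0 ≤ pvIx r ∧ pvIx r < (nN : Int))
    (hnd : (R.map pvIx).Nodup) :
    ∀ (rest P : List (List Int)) (st : Int × Int × Int × List Bool),
      R = P ++ rest → pvInv R nN P st → pvInv R nN R (rest.foldl pvStepA st) := by
  intro rest
  induction rest with
  | nil => intro P st h hI; rw [List.append_nil] at h; subst h; simpa using hI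
  | cons x rest ih =>
    intro P st h hI
    simp only [List.foldl_cons]
    exact ih (P ++ [x]) _ (by rw [h, List.append_assoc]; rfl)
      (pvStep_preserves R nN hpw hix hnd P x rest h st hI)

-- characterization of A's scan output
theorem pvScanA_char (L : List (List Int)) (nN : Nat) (hL : L ≠ [])
    (hpw : L.Pairwise (fun a b => pvKey1 a ≤ pvKey1 b))
    (hix : ∀ r ∈ L, 0 ≤ pvIx r ∧ pvIx r < (nN : Int))
    (hnd : (L.map pvIx).Nodup)
    (hlenL : L.length = nN)
    (fail0 : List Bool) (hlen0 : fail0.length = nN)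
    (h00 : ∀ j : Nat, j < nN → fail0.getD j false = false) :
    (pvScanA (nN : Int) L fail0).length = nN ∧
    ∀ x ∈ L, (pvScanA (nN : Int) L fail0).getD (pvIx x).toNat false =
      decide (pvBig L (pvAx x) > pvBx x) := by
  obtain ⟨r0, R', hR⟩ := List.exists_cons_of_ne_nil (show L.reverse ≠ [] by simpa using hL)
  have hglast : L.getLast hL = r0 := by
    rw [List.getLast_eq_head_reverse]
    simp [hR]
  have hrange : PySem.List.pyRange ((nN : Int) - 1) (-1) (-1)
      = (PySem.List.pyRange 0 (nN : Int)).reverse := by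
    rw [PySem.List.pyRange_neg_one_eq_reverse]
    norm_num
  have hmap : (PySem.List.pyRange 0 (nN : Int)).map
      (fun j => PySem.List.pyGetD L j ([] : List Int)) = L := by
    have h := PySem.List.map_pyGetD_pyRange_zero L ([] : List Int)
    rw [PySem.List.len_eq, hlenL] at h
    exact h
  have hfold : pvScanA (nN : Int) L fail0
      = ((L.reverse).foldl pvStepA
          (PySem.List.pyGetD r0 0 0, -1, PySem.List.pyGetD r0 1 0, fail0)).2.2.2 := by
    unfold pvScanA
    rw [hrange, PySem.List.pyGetD_neg_one L ([] : List Int) hL, hglast]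
    congr 1
    conv_rhs => rw [← hmap, ← List.map_reverse, List.foldl_map]
  have hpwR : (L.reverse).Pairwise pvRel := by
    rw [List.pairwise_reverse]
    refine hpw.imp ?_
    intro a b h
    rcases Prod.Lex.toLex_le_toLex.mp
      (show toLex (pvAx a, pvBx a) ≤ toLex (pvAx b, pvBx b) from h) with h' | ⟨h1, h2⟩
    · exact Or.inl h'
    · exact Or.inr ⟨h1, h2⟩
  have hixR : ∀ r ∈ L.reverse, 0 ≤ pvIx r ∧ pvIx r < (nN : Int) := by
    intro r hr
    exact hix r (List.mem_reverse.mp hr)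
  have hndR : ((L.reverse).map pvIx).Nodup := by
    rw [List.map_reverse, List.nodup_reverse]
    exact hnd
  have hbase : pvInv (L.reverse) nN [r0]
      (pvStepA (PySem.List.pyGetD r0 0 0, -1, PySem.List.pyGetD r0 1 0, fail0) r0) := by
    have hb : pvBoundaryA (PySem.List.pyGetD r0 0 0, -1, PySem.List.pyGetD r0 1 0, fail0) r0
        = (pvAx r0, -1, pvBx r0, fail0) := by
      unfold pvBoundaryA
      rw [if_neg (not_not_intro rfl)]
      rfl
    rw [pvStepA_eq _ _ _ _ _ _ hb]
    have hcore := pvInv_core (L.reverse) nN hpwR hixR hndR [] r0 R' (by simpa using hR)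
      (-1) (pvBx r0) fail0 ?_ ?_ ?_ ?_ hlen0 ?_ ?_
    · simpa using hcore
    · simp [pvBig, pvM]
    · exact ⟨r0, by simp, rfl, rfl⟩
    · intro y hy hyax
      have : y = r0 := by simpa using hy
      rw [this]
    · intro y hy
      simp at hy
    · intro j hj _
      exact h00 j hj
    · intro y hy
      simp at hy
  have hfin := pvScan_fold (L.reverse) nN hpwR hixR hndR R' [r0] _ (by simpa using hR) hbase
  obtain ⟨_, _, _, _, _, _, hlenF, _, hSF⟩ := hfin
  have hsteps : (L.reverse).foldl pvStepA
      (PySem.List.pyGetD r0 0 0, -1, PySem.List.pyGetD r0 1 0, fail0)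
      = R'.foldl pvStepA
        (pvStepA (PySem.List.pyGetD r0 0 0, -1, PySem.List.pyGetD r0 1 0, fail0) r0) := by
    rw [hR]
    rfl
  constructor
  · rw [hfold, hsteps]
    exact hlenF
  · intro x hx
    have hxR : x ∈ L.reverse := List.mem_reverse.mpr hx
    have hS := hSF x hxR
    have hbig : pvBig (L.reverse) (pvAx x) = pvBig L (pvAx x) :=
      pvM_perm (((List.reverse_perm L).filter _).map _)
    rw [hfold, hsteps, hS, hbig]

-- ---- bridge to B ----

theorem pvCount_eq (fail : List Bool) (l : List (List Int)) :
    ∀ ans, pvCountA fail l ans = pvCountB fail l ans := by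
  induction l with
  | nil => intro ans; rfl
  | cons r rest ih =>
    intro ans
    simp only [pvCountA, pvCountB]
    split
    · rfl
    · split <;> simp [ih]

theorem pvFailB_length (scores : List (List Int)) : (pvFailB scores).length = scores.length := by
  simp [pvFailB]

theorem pvFailB_getD (scores : List (List Int)) (j : Nat) (hj : j < scores.length) :
    (pvFailB scores).getD j false
      = decide (pvM ((scores.filter (fun t => decide (pvAx scores[j] < pvAx t))).map pvBx)
          > pvBx scores[j]) := by
  unfold pvFailB
  rw [List.getD_eq_getElem?_getD, List.getElem?_map, List.getElem?_eq_getElem hj]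
  simp only [Option.map_some, Option.getD_some]
  rw [PySem.List.max?_id_cons, Option.getD_some]
  rfl

theorem pvAppend_row_ax (sx : List Int) (i : Int) (hs : sx.length = 2) :
    pvAx (sx ++ [i]) = pvAx sx := by
  obtain ⟨a, b, rfl⟩ := List.length_eq_two.mp hs
  rfl

theorem pvAppend_row_bx (sx : List Int) (i : Int) (hs : sx.length = 2) :
    pvBx (sx ++ [i]) = pvBx sx := by
  obtain ⟨a, b, rfl⟩ := List.length_eq_two.mp hs
  rfl

theorem pvAppend_row_ix (sx : List Int) (i : Int) (hs : sx.length = 2) :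
    pvIx (sx ++ [i]) = i := by
  obtain ⟨a, b, rfl⟩ := List.length_eq_two.mp hs
  rfl

theorem pvBig_appIdx (sc : List (List Int)) (hlen2 : ∀ s ∈ sc, s.length = 2) (c : Int) :
    pvBig (pvAppIdx sc) c = pvM ((sc.filter (fun t => decide (c < pvAx t))).map pvBx) := by
  unfold pvBig pvAppIdx
  rw [List.filter_map, List.map_map]
  have h1 : (PySem.List.enumerate sc 0).filter
        ((fun y => decide (c < pvAx y)) ∘ (fun p => p.2 ++ [p.1]))
      = (PySem.List.enumerate sc 0).filter (fun p => decide (c < pvAx p.2)) := by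
    apply List.filter_congr
    intro p hp
    obtain ⟨k, hk, rfl⟩ := (PySem.List.mem_enumerate_iff _ _ _).mp hp
    simp only [Function.comp_apply]
    rw [pvAppend_row_ax _ _ (hlen2 _ (List.getElem_mem _))]
  rw [h1]
  have h3 : ((PySem.List.enumerate sc 0).filter (fun p => decide (c < pvAx p.2))).map
        (pvBx ∘ (fun p => p.2 ++ [p.1]))
      = ((PySem.List.enumerate sc 0).filter (fun p => decide (c < pvAx p.2))).map
        (fun p => pvBx p.2) := by
    apply List.map_congr_left
    intro p hp
    obtain ⟨k, hk, rfl⟩ := (PySem.List.mem_enumerate_iff _ _ _).mp (List.mem_of_mem_filter hp)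
    simp only [Function.comp_apply]
    rw [pvAppend_row_bx _ _ (hlen2 _ (List.getElem_mem _))]
  rw [h3]
  have h4 : (fun (p : Int × List Int) => pvBx p.2) = pvBx ∘ (fun p => p.2) := rfl
  have h5 : (fun (p : Int × List Int) => decide (c < pvAx p.2))
      = (fun t => decide (c < pvAx t)) ∘ (fun (p : Int × List Int) => p.2) := rfl
  rw [h4, ← List.map_map, h5, ← List.filter_map, PySem.List.map_snd_enumerate]

theorem pvAppIdx_mapIx (sc : List (List Int)) (hlen2 : ∀ s ∈ sc, s.length = 2) :
    (pvAppIdx sc).map pvIx = PySem.List.pyRange 0 (sc.length : Int) := by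
  unfold pvAppIdx
  rw [List.map_map]
  have h1 : ∀ p ∈ PySem.List.enumerate sc 0, (pvIx ∘ (fun p => p.2 ++ [p.1])) p = p.1 := by
    intro p hp
    obtain ⟨k, hk, rfl⟩ := (PySem.List.mem_enumerate_iff _ _ _).mp hp
    simp only [Function.comp_apply]
    rw [pvAppend_row_ix _ _ (hlen2 _ (List.getElem_mem _))]
  rw [List.map_congr_left h1]
  have := PySem.List.map_fst_enumerate sc 0
  simpa using this

theorem pvMain (scores : List (List Int)) (hne : scores ≠ [])
    (hlen2 : ∀ s ∈ scores, s.length = 2) : solution scores = solution_alt scores := by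
  have happ := pvAppendIdx_eq scores
  have happlen : (pvAppIdx scores).length = scores.length := pvAppIdx_length scores
  have hmapIx := pvAppIdx_mapIx scores hlen2
  have hndapp : ((pvAppIdx scores).map pvIx).Nodup := by
    rw [hmapIx]
    exact PySem.List.nodup_pyRange_one 0 (scores.length : Int)
  have hixapp : ∀ r ∈ pvAppIdx scores, 0 ≤ pvIx r ∧ pvIx r < (scores.length : Int) := by
    intro r hr
    have hm : pvIx r ∈ (pvAppIdx scores).map pvIx := List.mem_map_of_mem hr
    rw [hmapIx] at hm
    exact PySem.List.mem_pyRange_one.mp hm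
  have hpermL : (pvSortAB (pvAppIdx scores)).Perm (pvAppIdx scores) := by
    rw [pvSortAB_eq]
    exact PySem.List.sorted_perm _ _ _
  have hLlen : (pvSortAB (pvAppIdx scores)).length = scores.length := by
    rw [hpermL.length_eq, happlen]
  have hLne : pvSortAB (pvAppIdx scores) ≠ [] := by
    intro h
    rw [h] at hLlen
    exact hne (List.length_eq_zero_iff.mp hLlen.symm)
  have hpwL : (pvSortAB (pvAppIdx scores)).Pairwise (fun a b => pvKey1 a ≤ pvKey1 b) := by
    rw [pvSortAB_eq]
    exact PySem.List.sorted_pairwise _ _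
  have hndL : ((pvSortAB (pvAppIdx scores)).map pvIx).Nodup :=
    ((hpermL.map pvIx).nodup_iff).mpr hndapp
  have hixL : ∀ r ∈ pvSortAB (pvAppIdx scores), 0 ≤ pvIx r ∧ pvIx r < (scores.length : Int) :=
    fun r hr => hixapp r (hpermL.subset hr)
  have hf0len : (pvFail0 scores).length = scores.length := by
    simp [pvFail0, PySem.List.length_pyRange_one]
  have hf00 : ∀ j : Nat, j < scores.length → (pvFail0 scores).getD j false = false := by
    intro j hj
    simp [pvFail0, List.getD_eq_getElem?_getD]
  obtain ⟨hFlen, hFS⟩ := pvScanA_char (pvSortAB (pvAppIdx scores)) scores.length hLne hpwL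
    hixL hndL hLlen (pvFail0 scores) hf0len hf00
  -- the two fail lists are equal
  have hFeq : pvScanA (scores.length : Int) (pvSortAB (pvAppIdx scores)) (pvFail0 scores)
      = pvFailB scores := by
    apply List.ext_getElem (by rw [hFlen, pvFailB_length])
    intro i h1 h2
    have hi : i < scores.length := by rw [hFlen] at h1; exact h1
    have e1 : (pvScanA (scores.length : Int) (pvSortAB (pvAppIdx scores)) (pvFail0 scores)).getD i false
        = (pvScanA (scores.length : Int) (pvSortAB (pvAppIdx scores)) (pvFail0 scores))[i] := by
      rw [List.getD_eq_getElem?_getD, List.getElem?_eq_getElem h1]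
      rfl
    have e2 : (pvFailB scores).getD i false = (pvFailB scores)[i] := by
      rw [List.getD_eq_getElem?_getD, List.getElem?_eq_getElem h2]
      rfl
    rw [← e1, ← e2]
    have hx? : (pvAppIdx scores)[i]? = some (scores[i] ++ [(i : Int)]) := by
      rw [pvAppIdx_getElem?, List.getElem?_eq_getElem hi]
      rfl
    have hxmem : scores[i] ++ [(i : Int)] ∈ pvAppIdx scores := by
      have hlt : i < (pvAppIdx scores).length := by rw [pvAppIdx_length]; exact hi
      have : (pvAppIdx scores)[i] = scores[i] ++ [(i : Int)] := by
        have := List.getElem?_eq_getElem hlt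
        rw [hx?] at this
        exact (Option.some.injEq _ _).mp this.symm
      rw [← this]
      exact List.getElem_mem _
    have hxL : scores[i] ++ [(i : Int)] ∈ pvSortAB (pvAppIdx scores) :=
      hpermL.mem_iff.mpr hxmem
    have hs2 : scores[i].length = 2 := hlen2 _ (List.getElem_mem _)
    have hSx := hFS _ hxL
    rw [pvAppend_row_ix _ _ hs2, pvAppend_row_ax _ _ hs2, pvAppend_row_bx _ _ hs2] at hSx
    rw [Int.toNat_natCast] at hSx
    have hbig1 : pvBig (pvSortAB (pvAppIdx scores)) (pvAx scores[i])
        = pvBig (pvAppIdx scores) (pvAx scores[i]) :=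
      pvM_perm ((hpermL.filter _).map _)
    rw [hbig1, pvBig_appIdx scores hlen2] at hSx
    rw [hSx, pvFailB_getD scores i hi]
  -- the two final sorts are equal
  have hsort : pvFinalSort (pvSortAB (pvAppIdx scores)) = pvFinalSort (pvAppIdx scores) := by
    rw [pvFinalSort_eq, pvFinalSort_eq]
    apply PySem.List.sorted_rev_eq_of_perm_of_pairwise_gt
    · exact (PySem.List.sorted_perm _ _ _).trans hpermL.symm
    · have hle := PySem.List.sorted_pairwise_rev (pvAppIdx scores) pvKey2
      have hperm2 : (PySem.List.sorted (pvAppIdx scores) pvKey2 true).Perm (pvAppIdx scores) :=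
        PySem.List.sorted_perm _ _ _
      have hndys : ((PySem.List.sorted (pvAppIdx scores) pvKey2 true).map pvIx).Nodup :=
        ((hperm2.map pvIx).nodup_iff).mpr hndapp
      have hne2 : (PySem.List.sorted (pvAppIdx scores) pvKey2 true).Pairwise
          (fun a b => pvIx a ≠ pvIx b) := List.pairwise_map.mp hndys
      refine (hle.and hne2).imp ?_
      rintro a b ⟨h1, h2⟩
      refine lt_of_le_of_ne h1 ?_
      intro heq
      apply h2
      have : ((pvAx b + pvBx b, -(pvIx b)) : Int × Int) = (pvAx a + pvBx a, -(pvIx a)) :=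
        toLex.injective heq
      have h3 := congrArg Prod.snd this
      simp only at h3
      omega
  -- assemble
  show (if PySem.List.pyGetD
          (pvScanA (scores.length : Int) (pvSortAB (pvAppendIdx scores)) (pvFail0 scores)) 0 false
        then -1
        else pvCountA
          (pvScanA (scores.length : Int) (pvSortAB (pvAppendIdx scores)) (pvFail0 scores))
          (pvFinalSort (pvSortAB (pvAppendIdx scores))) 0)
      = (if PySem.List.pyGetD (pvFailB scores) 0 false then -1
        else pvCountB (pvFailB scores) (pvFinalSort (pvAppendIdx scores)) 0)
  rw [happ, hFeq, hsort]
  split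
  · rfl
  · exact pvCount_eq _ _ 0

-- ===== VERDICT (by name: the statement is the Claim_ definition above) =====
theorem solution_spec : Claim_equal_solution := by
  intro scores _hdom hpre
  exact pvMain scores hpre.1 hpre.2
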